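-- pv_equiv track=rewrite | github.com/gabboDTD/vat-vies-checker | partita_iva_validator.py | check_partita_iva
-- ===== SOURCE A (Python) =====
-- def check_partita_iva(partita_iva: str) -> tuple:
--     """
--     Check the validity of an Italian Partita IVA (VAT number) and whether it starts with 'IT'.
--
--     A valid Partita IVA must:
--     - Be exactly 11 digits long (after removing any "IT" prefix).
--     - Pass a checksum validation on the last digit.
--
--     Args:
--     - partita_iva (str): The Partita IVA to validate.
--
--     Returns:
--     - tuple: (is_valid, starts_with_IT), where
--         - is_valid (bool): True if the Partita IVA is valid, False otherwise.
--         - starts_with_IT (bool): True if the Partita IVA starts with 'IT', False otherwise.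
--     """
--     # Check if the Partita IVA starts with 'IT'
--     starts_with_IT = partita_iva.startswith("IT") if partita_iva else False
--
--     # Remove "IT" prefix if present
--     if starts_with_IT:
--         partita_iva = partita_iva[2:]
--
--     # Check if the Partita IVA is exactly 11 digits
--     if not partita_iva or not partita_iva.isdigit() or len(partita_iva) != 11:
--         return False, starts_with_IT
--
--     # Calculate the checksum for validation
--     even_sum = sum(int(partita_iva[i]) for i in range(0, 10, 2))
--     odd_sum = sum((2 * int(partita_iva[i]) if 2 * int(partita_iva[i]) < 10 else 2 * int(partita_iva[i]) - 9)
--                   for i in range(1, 10, 2))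
--     checksum = (even_sum + odd_sum) % 10
--     control_digit = (10 - checksum) % 10
--
--     # The last digit of the Partita IVA should match the control digit
--     is_valid = int(partita_iva[-1]) == control_digit
--
--     return is_valid, starts_with_IT
-- ===== SOURCE B (Python) =====
-- def _pair_total(digits):
--     # consume (even-position, odd-position) digit pairs recursively;
--     # digit-sum of 2*o computed with divmod
--     if not digits:
--         return 0
--     e, o = digits[0], digits[1]
--     q, m = divmod(2 * o, 10)
--     return e + q + m + _pair_total(digits[2:])
--
--
-- def check_partita_iva(partita_iva: str) -> tuple:
--     starts_with_IT = partita_iva.startswith("IT") if partita_iva else False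
--     if starts_with_IT:
--         partita_iva = partita_iva[2:]
--     if not partita_iva or not partita_iva.isdigit() or len(partita_iva) != 11:
--         return False, starts_with_IT
--     digits = [ord(ch) - 48 for ch in partita_iva]
--     total = _pair_total(digits[:10])
--     return (10 - total) % 10 == digits[10], starts_with_IT
-- ===== Notes on version B (the rewrite author's own statement) =====
-- stated objective: alternative
-- what changed: Replaces A's two strided even/odd index comprehensions and inline double-or-subtract-9 with a recursive helper that consumes an ord-derived digit list two at a time, computing the doubled digit's digit-sum via divmod, and compares (10 - total) % 10 directly against the last digit.
import Mathlib
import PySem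

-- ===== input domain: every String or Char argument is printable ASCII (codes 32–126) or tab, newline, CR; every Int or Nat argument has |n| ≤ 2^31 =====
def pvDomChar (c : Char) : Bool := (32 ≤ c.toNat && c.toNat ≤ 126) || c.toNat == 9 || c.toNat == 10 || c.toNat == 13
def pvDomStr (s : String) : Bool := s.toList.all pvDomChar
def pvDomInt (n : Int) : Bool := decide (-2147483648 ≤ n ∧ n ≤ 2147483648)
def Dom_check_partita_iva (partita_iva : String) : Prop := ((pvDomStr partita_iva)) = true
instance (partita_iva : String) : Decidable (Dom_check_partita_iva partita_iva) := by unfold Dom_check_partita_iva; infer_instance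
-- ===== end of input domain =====

-- B replaces A's two strided even/odd comprehensions by a recursive helper consuming an
-- ord-derived digit list two at a time, with divmod digit-sums (objective: alternative).

-- ===== PORT A =====
-- int(ch) for a one-character string; exact: A only calls it after the isdigit guard,
-- where Python does not raise.
def pvDigit (c : Char) : Int := (PySem.Int.ofChars? [c]).getD 0

def check_partita_iva (partita_iva : String) : Bool × Bool :=
  let cs0 := partita_iva.toList
  let starts_with_IT := if cs0 = [] then false else PySem.Chars.startswith cs0 ['I', 'T']
  let cs := if starts_with_IT then PySem.Chars.slice cs0 (some 2) none else cs0
  if cs = [] ∨ PySem.Chars.strIsdigit cs = false ∨ PySem.List.len cs ≠ 11 then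
    (false, starts_with_IT)
  else
    -- indices 0..9 and -1 are in range here (len cs = 11), so the total pyGetD is exact
    let even_sum := ((PySem.List.pyRange 0 10 2).map
      (fun i => pvDigit (PySem.List.pyGetD cs i '0'))).sum
    let odd_sum := ((PySem.List.pyRange 1 10 2).map
      (fun i => if 2 * pvDigit (PySem.List.pyGetD cs i '0') < 10 then
                  2 * pvDigit (PySem.List.pyGetD cs i '0')
                else 2 * pvDigit (PySem.List.pyGetD cs i '0') - 9)).sum
    let checksum := PySem.Int.mod (even_sum + odd_sum) 10
    let control_digit := PySem.Int.mod (10 - checksum) 10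
    let is_valid := pvDigit (PySem.List.pyGetD cs (-1) '0') == control_digit
    (is_valid, starts_with_IT)

-- ===== PORT B =====
-- _pair_total: recursion on the digit list two at a time; divmod(2*o, 10) is exact
-- (divisor is the nonzero literal 10). The one-element case is unreachable in B
-- (always called on a 10-element slice); Python would raise IndexError there.
def pvPairTotal : List Int → Int
  | [] => 0
  | [_] => 0
  | e :: o :: rest =>
    let qm := (PySem.Int.divmod? (2 * o) 10).getD (0, 0)
    e + qm.1 + qm.2 + pvPairTotal rest

def check_partita_iva_alt (partita_iva : String) : Bool × Bool :=
  let cs0 := partita_iva.toList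
  let starts_with_IT := if cs0 = [] then false else PySem.Chars.startswith cs0 ['I', 'T']
  let cs := if starts_with_IT then PySem.Chars.slice cs0 (some 2) none else cs0
  if cs = [] ∨ PySem.Chars.strIsdigit cs = false ∨ PySem.List.len cs ≠ 11 then
    (false, starts_with_IT)
  else
    let digits := cs.map (fun ch => (ch.toNat : Int) - 48)   -- ord(ch) - 48
    let total := pvPairTotal (PySem.List.slice digits none (some 10))
    -- index 10 is in range here (len digits = 11), so pyGetD is exact
    (PySem.Int.mod (10 - total) 10 == PySem.List.pyGetD digits 10 0, starts_with_IT)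

-- ===== PRECONDITION & SPEC =====
def Spec_check_partita_iva (partita_iva : String) (out : Bool × Bool) : Prop := out = check_partita_iva_alt partita_iva
instance (partita_iva : String) (out : Bool × Bool) : Decidable (Spec_check_partita_iva partita_iva out) := by unfold Spec_check_partita_iva; infer_instance

-- ===== CLAIM (what is proved, stated in full; the proofs are below) =====
def Claim_equal_check_partita_iva : Prop := ∀ (partita_iva : String), Dom_check_partita_iva partita_iva → Spec_check_partita_iva partita_iva (check_partita_iva partita_iva)

-- ===== LEMMAS AND PROOFS =====

lemma pv_digit_cases (c : Char) (h : PySem.Chars.isdigit c = true) :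
    c = '0' ∨ c = '1' ∨ c = '2' ∨ c = '3' ∨ c = '4' ∨
    c = '5' ∨ c = '6' ∨ c = '7' ∨ c = '8' ∨ c = '9' := by
  simp [PySem.Chars.isdigit, Char.le_def] at h
  have h48 : 48 ≤ c.toNat := by exact_mod_cast h.1
  have h57 : c.toNat ≤ 57 := by exact_mod_cast h.2
  have hc : c = Char.ofNat c.toNat := (Char.ofNat_toNat c).symm
  interval_cases hn : c.toNat <;> simp_all

-- on a digit char, B's ord-48 value is A's int() value
lemma pv_ord_eq (c : Char) (h : PySem.Chars.isdigit c = true) :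
    ((c.toNat : Int) - 48) = pvDigit c := by
  rcases pv_digit_cases c h with rfl | rfl | rfl | rfl | rfl | rfl | rfl | rfl | rfl | rfl <;> decide

-- on a digit char, B's divmod digit-sum is A's inline double-or-subtract-9
lemma pv_divmod_eq (c : Char) (h : PySem.Chars.isdigit c = true) :
    ((PySem.Int.divmod? (2 * pvDigit c) 10).getD (0, 0)).1 +
      ((PySem.Int.divmod? (2 * pvDigit c) 10).getD (0, 0)).2 =
      if 2 * pvDigit c < 10 then 2 * pvDigit c else 2 * pvDigit c - 9 := by
  rcases pv_digit_cases c h with rfl | rfl | rfl | rfl | rfl | rfl | rfl | rfl | rfl | rfl <;> decide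

-- (10 - t) mod 10 = (10 - t mod 10) mod 10 for Python's mod
lemma pv_mod_eq (t : Int) :
    PySem.Int.mod (10 - t) 10 = PySem.Int.mod (10 - PySem.Int.mod t 10) 10 := by
  simp only [PySem.Int.mod_eq_emod_of_pos (by norm_num : (0:Int) < 10)]
  omega

-- the two checksum branches agree on any all-digit list of length 11
lemma pv_tail_eq (cs : List Char) (sw : Bool) (hd : PySem.Chars.strIsdigit cs = true)
    (hlen : cs.length = 11) :
    ((pvDigit (PySem.List.pyGetD cs (-1) '0') ==
       PySem.Int.mod (10 - PySem.Int.mod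
         (((PySem.List.pyRange 0 10 2).map (fun i => pvDigit (PySem.List.pyGetD cs i '0'))).sum +
          ((PySem.List.pyRange 1 10 2).map (fun i =>
            if 2 * pvDigit (PySem.List.pyGetD cs i '0') < 10 then
              2 * pvDigit (PySem.List.pyGetD cs i '0')
            else 2 * pvDigit (PySem.List.pyGetD cs i '0') - 9)).sum) 10) 10, sw)) =
    ((PySem.Int.mod (10 - pvPairTotal
        (PySem.List.slice (cs.map (fun ch => (ch.toNat : Int) - 48)) none (some 10))) 10 ==
      PySem.List.pyGetD (cs.map (fun ch => (ch.toNat : Int) - 48)) 10 0, sw)) := by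
  match cs, hlen with
  | [c0, c1, c2, c3, c4, c5, c6, c7, c8, c9, c10], _ =>
    simp only [PySem.Chars.strIsdigit, List.all_cons, List.all_nil, List.isEmpty,
      Bool.and_eq_true, Bool.not_eq_true'] at hd
    obtain ⟨-, h0, h1, h2, h3, h4, h5, h6, h7, h8, h9, h10, -⟩ := hd
    have e1 := pv_divmod_eq c1 h1
    have e3 := pv_divmod_eq c3 h3
    have e5 := pv_divmod_eq c5 h5
    have e7 := pv_divmod_eq c7 h7
    have e9 := pv_divmod_eq c9 h9
    have hsl : PySem.List.slice
        ([c0, c1, c2, c3, c4, c5, c6, c7, c8, c9, c10].map (fun ch => (ch.toNat : Int) - 48))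
        none (some 10)
        = [((c0.toNat : Int) - 48), ((c1.toNat : Int) - 48), ((c2.toNat : Int) - 48),
           ((c3.toNat : Int) - 48), ((c4.toNat : Int) - 48), ((c5.toNat : Int) - 48),
           ((c6.toNat : Int) - 48), ((c7.toNat : Int) - 48), ((c8.toNat : Int) - 48),
           ((c9.toNat : Int) - 48)] := rfl
    have g10 : PySem.List.pyGetD
        ([c0, c1, c2, c3, c4, c5, c6, c7, c8, c9, c10].map (fun ch => (ch.toNat : Int) - 48))
        10 0 = (c10.toNat : Int) - 48 := rfl
    have gm1 : PySem.List.pyGetD [c0, c1, c2, c3, c4, c5, c6, c7, c8, c9, c10] (-1) '0' = c10 := rfl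
    have g0 : PySem.List.pyGetD [c0, c1, c2, c3, c4, c5, c6, c7, c8, c9, c10] (0:Int) '0' = c0 := rfl
    have g1 : PySem.List.pyGetD [c0, c1, c2, c3, c4, c5, c6, c7, c8, c9, c10] (1:Int) '0' = c1 := rfl
    have g2 : PySem.List.pyGetD [c0, c1, c2, c3, c4, c5, c6, c7, c8, c9, c10] (2:Int) '0' = c2 := rfl
    have g3 : PySem.List.pyGetD [c0, c1, c2, c3, c4, c5, c6, c7, c8, c9, c10] (3:Int) '0' = c3 := rfl
    have g4 : PySem.List.pyGetD [c0, c1, c2, c3, c4, c5, c6, c7, c8, c9, c10] (4:Int) '0' = c4 := rfl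
    have g5 : PySem.List.pyGetD [c0, c1, c2, c3, c4, c5, c6, c7, c8, c9, c10] (5:Int) '0' = c5 := rfl
    have g6 : PySem.List.pyGetD [c0, c1, c2, c3, c4, c5, c6, c7, c8, c9, c10] (6:Int) '0' = c6 := rfl
    have g7 : PySem.List.pyGetD [c0, c1, c2, c3, c4, c5, c6, c7, c8, c9, c10] (7:Int) '0' = c7 := rfl
    have g8 : PySem.List.pyGetD [c0, c1, c2, c3, c4, c5, c6, c7, c8, c9, c10] (8:Int) '0' = c8 := rfl
    have g9 : PySem.List.pyGetD [c0, c1, c2, c3, c4, c5, c6, c7, c8, c9, c10] (9:Int) '0' = c9 := rfl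
    rw [show PySem.List.pyRange 0 10 2 = [0,2,4,6,8] from by decide,
        show PySem.List.pyRange 1 10 2 = [1,3,5,7,9] from by decide, hsl, g10, gm1]
    simp only [List.map_cons, List.map_nil, List.sum_cons, List.sum_nil, pvPairTotal,
      g0, g1, g2, g3, g4, g5, g6, g7, g8, g9,
      pv_ord_eq c0 h0, pv_ord_eq c1 h1, pv_ord_eq c2 h2, pv_ord_eq c3 h3, pv_ord_eq c4 h4,
      pv_ord_eq c5 h5, pv_ord_eq c6 h6, pv_ord_eq c7 h7, pv_ord_eq c8 h8, pv_ord_eq c9 h9,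
      pv_ord_eq c10 h10]
    have hsum : pvDigit c0 + ((PySem.Int.divmod? (2 * pvDigit c1) 10).getD (0, 0)).1 +
          ((PySem.Int.divmod? (2 * pvDigit c1) 10).getD (0, 0)).2 +
        (pvDigit c2 + ((PySem.Int.divmod? (2 * pvDigit c3) 10).getD (0, 0)).1 +
            ((PySem.Int.divmod? (2 * pvDigit c3) 10).getD (0, 0)).2 +
          (pvDigit c4 + ((PySem.Int.divmod? (2 * pvDigit c5) 10).getD (0, 0)).1 +
              ((PySem.Int.divmod? (2 * pvDigit c5) 10).getD (0, 0)).2 +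
            (pvDigit c6 + ((PySem.Int.divmod? (2 * pvDigit c7) 10).getD (0, 0)).1 +
                ((PySem.Int.divmod? (2 * pvDigit c7) 10).getD (0, 0)).2 +
              (pvDigit c8 + ((PySem.Int.divmod? (2 * pvDigit c9) 10).getD (0, 0)).1 +
                  ((PySem.Int.divmod? (2 * pvDigit c9) 10).getD (0, 0)).2 +
                0)))) =
        pvDigit c0 + (pvDigit c2 + (pvDigit c4 + (pvDigit c6 + (pvDigit c8 + 0)))) +
        ((if 2 * pvDigit c1 < 10 then 2 * pvDigit c1 else 2 * pvDigit c1 - 9) +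
          ((if 2 * pvDigit c3 < 10 then 2 * pvDigit c3 else 2 * pvDigit c3 - 9) +
            ((if 2 * pvDigit c5 < 10 then 2 * pvDigit c5 else 2 * pvDigit c5 - 9) +
              ((if 2 * pvDigit c7 < 10 then 2 * pvDigit c7 else 2 * pvDigit c7 - 9) +
                ((if 2 * pvDigit c9 < 10 then 2 * pvDigit c9 else 2 * pvDigit c9 - 9) + 0))))) := by
      linear_combination e1 + e3 + e5 + e7 + e9
    rw [hsum]
    conv_rhs => rw [pv_mod_eq]
    rw [Bool.beq_comm]

-- proof-only abbreviations for the shared prefix of the two ports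
def pvSW (s : String) : Bool :=
  if s.toList = [] then false else PySem.Chars.startswith s.toList ['I', 'T']

def pvCS (s : String) : List Char :=
  if pvSW s then PySem.Chars.slice s.toList (some 2) none else s.toList

-- ===== VERDICT (by name: the statement is the Claim_ definition above) =====
theorem check_partita_iva_spec : Claim_equal_check_partita_iva := by
  intro s _
  show (if pvCS s = [] ∨ PySem.Chars.strIsdigit (pvCS s) = false ∨ PySem.List.len (pvCS s) ≠ 11 then
      ((false, pvSW s) : Bool × Bool)
    else
      (pvDigit (PySem.List.pyGetD (pvCS s) (-1) '0') ==
        PySem.Int.mod (10 - PySem.Int.mod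
          (((PySem.List.pyRange 0 10 2).map (fun i => pvDigit (PySem.List.pyGetD (pvCS s) i '0'))).sum +
           ((PySem.List.pyRange 1 10 2).map (fun i =>
             if 2 * pvDigit (PySem.List.pyGetD (pvCS s) i '0') < 10 then
               2 * pvDigit (PySem.List.pyGetD (pvCS s) i '0')
             else 2 * pvDigit (PySem.List.pyGetD (pvCS s) i '0') - 9)).sum) 10) 10, pvSW s)) =
    (if pvCS s = [] ∨ PySem.Chars.strIsdigit (pvCS s) = false ∨ PySem.List.len (pvCS s) ≠ 11 then
      ((false, pvSW s) : Bool × Bool)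
    else
      (PySem.Int.mod (10 - pvPairTotal
         (PySem.List.slice ((pvCS s).map (fun ch => (ch.toNat : Int) - 48)) none (some 10))) 10 ==
       PySem.List.pyGetD ((pvCS s).map (fun ch => (ch.toNat : Int) - 48)) 10 0, pvSW s))
  split_ifs with h
  · rfl
  · push Not at h
    obtain ⟨-, hd, hlen⟩ := h
    have hd' : PySem.Chars.strIsdigit (pvCS s) = true := by
      cases hh : PySem.Chars.strIsdigit (pvCS s)
      · exact absurd hh hd
      · rfl
    have hlen' : (pvCS s).length = 11 := by
      simp [PySem.List.len] at hlen
      exact_mod_cast hlen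
    exact pv_tail_eq (pvCS s) (pvSW s) hd' hlen'
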